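-- pv_equiv track=rewrite | github.com/tmould1/dystopia-mud | game/tools/mudedit/widgets/colors.py | parse_colored_segments
-- ===== SOURCE A (Python) =====
-- from typing import List, Tuple
--
-- TK_COLORS = {
--     '0': '#808080',   # Bright Black (gray)
--     '1': '#ff5555',   # Bright Red
--     '2': '#55ff55',   # Bright Green
--     '3': '#ffff55',   # Bright Yellow
--     '4': '#5555ff',   # Bright Blue
--     '5': '#ff55ff',   # Bright Purple
--     '6': '#55ffff',   # Bright Cyan
--     '7': '#c0c0c0',   # White
--     '8': '#404040',   # Black
--     '9': '#ffffff',   # Bright White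
--     'r': '#aa0000',   # Dark Red
--     'g': '#00aa00',   # Dark Green
--     'o': '#aa5500',   # Brown
--     'l': '#0000aa',   # Dark Blue
--     'p': '#aa00aa',   # Dark Purple
--     'c': '#00aaaa',   # Dark Cyan
--     'y': '#ffff55',   # Bright Yellow
--     'R': '#ff5555',   # Bright Red
--     'G': '#55ff55',   # Bright Green
--     'L': '#5555ff',   # Bright Blue
--     'P': '#ff55ff',   # Bright Purple
--     'C': '#55ffff',   # Bright Cyan
--     'n': '#c0c0c0',   # Reset (default text)
--     'i': None,        # Inverse (handled specially)
--     'u': None,        # Underline (handled specially)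
-- }
--
-- def parse_colored_segments(text: str) -> List[Tuple[str, str]]:
--     """
--     Parse MUD color-coded text into list of (plain_text, color_tag) tuples.
--
--     Supports:
--     - Standard codes: #0-#9, #r-#c, #R-#C, #n (reset), #i (inverse), #u (underline)
--     - 256-color codes: #xNNN (3-digit color index)
--     - Escape sequences: ## -> #, #- -> ~, #+ -> %
--     """
--     segments = []
--     current_tag = 'color_n'
--     buf = []
--     i = 0
--
--     while i < len(text):
--         if text[i] == '#' and i + 1 < len(text):
--             nxt = text[i + 1]
--             # Flush buffer
--             if buf:
--                 segments.append((''.join(buf), current_tag))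
--                 buf = []
--
--             if nxt == '#':
--                 buf.append('#')
--                 i += 2
--             elif nxt == '-':
--                 buf.append('~')
--                 i += 2
--             elif nxt == '+':
--                 buf.append('%')
--                 i += 2
--             elif nxt == 'x' and i + 4 < len(text) and text[i+2:i+5].isdigit():
--                 code = int(text[i+2:i+5])
--                 current_tag = f'color_x{code}'
--                 i += 5
--             elif nxt in TK_COLORS:
--                 current_tag = f'color_{nxt}'
--                 i += 2
--             else:
--                 buf.append(text[i])
--                 i += 1
--         else:
--             buf.append(text[i])
--             i += 1
--
--     if buf:
--         segments.append((''.join(buf), current_tag))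
--
--     return segments
-- ===== SOURCE B (Python) =====
-- import re
-- from typing import List, Tuple
--
-- TK_COLORS = {
--     '0': '#808080', '1': '#ff5555', '2': '#55ff55', '3': '#ffff55',
--     '4': '#5555ff', '5': '#ff55ff', '6': '#55ffff', '7': '#c0c0c0',
--     '8': '#404040', '9': '#ffffff', 'r': '#aa0000', 'g': '#00aa00',
--     'o': '#aa5500', 'l': '#0000aa', 'p': '#aa00aa', 'c': '#00aaaa',
--     'y': '#ffff55', 'R': '#ff5555', 'G': '#55ff55', 'L': '#5555ff',
--     'P': '#ff55ff', 'C': '#55ffff', 'n': '#c0c0c0', 'i': None, 'u': None,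
-- }
--
-- _ESCAPES = {'##': '#', '#-': '~', '#+': '%'}
-- # One token per step of the scanner: a full #xNNN code, a '#' paired with its
-- # following character, or a single ordinary character (including a trailing '#').
-- _TOKEN = re.compile(r'#x[0-9]{3}|#[\s\S]|[\s\S]')
--
--
-- def parse_colored_segments(text: str) -> List[Tuple[str, str]]:
--     segments: List[Tuple[str, str]] = []
--     tag = 'color_n'
--     buf = ''
--     for tok in _TOKEN.findall(text):
--         if tok[0] == '#' and len(tok) > 1:
--             if buf:
--                 segments.append((buf, tag))
--                 buf = ''
--             if tok in _ESCAPES: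
--                 buf = _ESCAPES[tok]
--             elif len(tok) == 5:
--                 tag = 'color_x%d' % int(tok[2:])
--             elif tok[1] in TK_COLORS:
--                 tag = 'color_' + tok[1]
--             else:
--                 buf = tok
--         else:
--             buf += tok
--     if buf:
--         segments.append((buf, tag))
--     return segments
-- ===== Notes on version B (the rewrite author's own statement) =====
-- stated objective: idiomatic
-- what changed: A's hand-written index/while character scanner is replaced by a compiled-regex tokenizer (findall of '#xNNN' codes, '#'+char pairs, and single characters) followed by a single fold over the token list that maintains (segments, tag, buffer).
import Mathlib
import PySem

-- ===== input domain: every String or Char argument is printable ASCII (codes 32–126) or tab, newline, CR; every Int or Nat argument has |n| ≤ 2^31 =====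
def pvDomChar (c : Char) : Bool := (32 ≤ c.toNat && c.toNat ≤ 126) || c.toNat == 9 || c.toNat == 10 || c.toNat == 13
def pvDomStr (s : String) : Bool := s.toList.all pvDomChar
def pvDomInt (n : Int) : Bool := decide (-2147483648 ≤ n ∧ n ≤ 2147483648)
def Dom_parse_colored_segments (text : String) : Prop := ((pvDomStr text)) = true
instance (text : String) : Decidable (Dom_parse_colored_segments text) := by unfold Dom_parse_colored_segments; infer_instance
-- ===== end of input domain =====

-- B replaces A's hand-rolled index/while scanner by a tokenize-then-fold design (regex findall in Python); equivalence of return values is proved.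


-- ===== PORT A =====
def TK_COLORS : PySem.Dict Char (Option String) := PySem.Dict.ofList [
  ('0', some "#808080"), ('1', some "#ff5555"), ('2', some "#55ff55"), ('3', some "#ffff55"),
  ('4', some "#5555ff"), ('5', some "#ff55ff"), ('6', some "#55ffff"), ('7', some "#c0c0c0"),
  ('8', some "#404040"), ('9', some "#ffffff"), ('r', some "#aa0000"), ('g', some "#00aa00"),
  ('o', some "#aa5500"), ('l', some "#0000aa"), ('p', some "#aa00aa"), ('c', some "#00aaaa"),
  ('y', some "#ffff55"), ('R', some "#ff5555"), ('G', some "#55ff55"), ('L', some "#5555ff"),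
  ('P', some "#ff55ff"), ('C', some "#55ffff"), ('n', some "#c0c0c0"), ('i', none), ('u', none)]

-- A's while-loop, step for step; `text[i+2:i+5]` with 0 ≤ i+2 is `(cs.drop (i+2)).take 3`
-- (exact for nonnegative in-order slice bounds), and the guarded `int(...)` is
-- `(PySem.Int.ofChars? …).getD 0` (the guard guarantees an all-digit slice, so `int` returns).
def pvA_loop (cs : List Char) (segments : List (String × String)) (current_tag : String)
    (buf : List Char) (i : Nat) : List (String × String) :=
  if h : i < cs.length then
    if cs.getD i ' ' = '#' ∧ i + 1 < cs.length then
      let nxt := cs.getD (i + 1) ' '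
      -- Flush buffer
      let segments' := if buf ≠ [] then segments ++ [(String.ofList buf, current_tag)] else segments
      let buf' : List Char := if buf ≠ [] then [] else buf
      if nxt = '#' then pvA_loop cs segments' current_tag (buf' ++ ['#']) (i + 2)
      else if nxt = '-' then pvA_loop cs segments' current_tag (buf' ++ ['~']) (i + 2)
      else if nxt = '+' then pvA_loop cs segments' current_tag (buf' ++ ['%']) (i + 2)
      else if nxt = 'x' ∧ i + 4 < cs.length ∧ PySem.Chars.strIsdigit ((cs.drop (i + 2)).take 3) then
        let code := (PySem.Int.ofChars? ((cs.drop (i + 2)).take 3)).getD 0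
        pvA_loop cs segments' ("color_x" ++ PySem.Int.toStr code) buf' (i + 5)
      else if TK_COLORS.contains nxt then
        pvA_loop cs segments' ("color_" ++ String.ofList [nxt]) buf' (i + 2)
      else pvA_loop cs segments' current_tag (buf' ++ [cs.getD i ' ']) (i + 1)
    else pvA_loop cs segments current_tag (buf ++ [cs.getD i ' ']) (i + 1)
  else if buf ≠ [] then segments ++ [(String.ofList buf, current_tag)] else segments
termination_by cs.length - i
decreasing_by all_goals omega

def parse_colored_segments (text : String) : List (String × String) :=
  pvA_loop text.toList [] "color_n" [] 0

-- ===== PORT B =====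
-- B's regex tokenizer `#x[0-9]{3}|#[\s\S]|[\s\S]` (leftmost-alternative priority), as a scanner
-- producing the same token list; `[0-9]` is PySem.Chars.isdigit (exact on the ASCII domain).
def pvTokens (cs : List Char) : List (List Char) :=
  match cs with
  | [] => []
  | '#' :: 'x' :: d1 :: d2 :: d3 :: rest =>
      if PySem.Chars.isdigit d1 && PySem.Chars.isdigit d2 && PySem.Chars.isdigit d3 then
        ['#', 'x', d1, d2, d3] :: pvTokens rest
      else ['#', 'x'] :: pvTokens (d1 :: d2 :: d3 :: rest)
  | '#' :: c :: rest => ['#', c] :: pvTokens rest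
  | c :: rest => [c] :: pvTokens rest
termination_by cs.length
decreasing_by all_goals (simp_all; try omega)

def pvESCAPES : PySem.Dict (List Char) String := PySem.Dict.ofList [
  (['#', '#'], "#"), (['#', '-'], "~"), (['#', '+'], "%")]

-- The body of B's `for tok in findall(...)` loop, on the state (segments, tag, buf).
def pvBstep (st : List (String × String) × String × List Char) (tok : List Char) :
    List (String × String) × String × List Char :=
  let (segments, tag, buf) := st
  if tok.headD ' ' = '#' ∧ 1 < tok.length then
    let (segments, buf) :=
      if buf ≠ [] then (segments ++ [(String.ofList buf, tag)], ([] : List Char)) else (segments, buf)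
    if pvESCAPES.contains tok then (segments, tag, (pvESCAPES.getD tok "").toList)
    else if tok.length = 5 then
      (segments, "color_x" ++ PySem.Int.toStr ((PySem.Int.ofChars? (tok.drop 2)).getD 0), buf)
    else if TK_COLORS.contains (tok.getD 1 ' ') then
      (segments, "color_" ++ String.ofList [tok.getD 1 ' '], buf)
    else (segments, tag, tok)
  else (segments, tag, buf ++ tok)

def parse_colored_segments_alt (text : String) : List (String × String) :=
  let st := (pvTokens text.toList).foldl pvBstep ([], "color_n", [])
  if st.2.2 ≠ [] then st.1 ++ [(String.ofList st.2.2, st.2.1)] else st.1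

-- ===== PRECONDITION & SPEC =====
def Spec_parse_colored_segments (text : String) (out : List (String × String)) : Prop := out = parse_colored_segments_alt text
instance (text : String) (out : List (String × String)) : Decidable (Spec_parse_colored_segments text out) := by unfold Spec_parse_colored_segments; infer_instance

-- ===== CLAIM (what is proved, stated in full; the proofs are below) =====
def Claim_equal_parse_colored_segments : Prop := ∀ (text : String), Dom_parse_colored_segments text → Spec_parse_colored_segments text (parse_colored_segments text)

-- ===== LEMMAS AND PROOFS =====

-- Proof-side restatement of A's loop on the remaining suffix of the text.
def pvHA : List Char → List (String × String) → String → List Char → List (String × String)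
  | [], segs, tag, buf => if buf ≠ [] then segs ++ [(String.ofList buf, tag)] else segs
  | c :: rest, segs, tag, buf =>
    if c = '#' ∧ rest ≠ [] then
      let nxt := rest.headD ' '
      let segs' := if buf ≠ [] then segs ++ [(String.ofList buf, tag)] else segs
      let buf' : List Char := if buf ≠ [] then [] else buf
      if nxt = '#' then pvHA rest.tail segs' tag (buf' ++ ['#'])
      else if nxt = '-' then pvHA rest.tail segs' tag (buf' ++ ['~'])
      else if nxt = '+' then pvHA rest.tail segs' tag (buf' ++ ['%'])
      else if nxt = 'x' ∧ 3 ≤ rest.tail.length ∧ PySem.Chars.strIsdigit (rest.tail.take 3) then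
        pvHA (rest.tail.drop 3) segs'
          ("color_x" ++ PySem.Int.toStr ((PySem.Int.ofChars? (rest.tail.take 3)).getD 0)) buf'
      else if TK_COLORS.contains nxt then
        pvHA rest.tail segs' ("color_" ++ String.ofList [nxt]) buf'
      else pvHA rest segs' tag (buf' ++ [c])
    else pvHA rest segs tag (buf ++ [c])
termination_by l => l.length
decreasing_by all_goals (simp [List.length_tail, List.length_drop]; try omega)

theorem pvDropCons (cs : List Char) (i : Nat) (h : i < cs.length) :
    cs.drop i = cs.getD i ' ' :: cs.drop (i + 1) := by
  rw [List.drop_eq_getElem_cons h, List.getD_eq_getElem cs ' ' h]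


theorem pvA_eq_hA (cs : List Char) (i : Nat) (segs : List (String × String)) (tag : String)
    (buf : List Char) : pvA_loop cs segs tag buf i = pvHA (cs.drop i) segs tag buf := by
  fun_induction pvA_loop cs segs tag buf i with
  | case1 segs tag buf i hlt hcond nxtv segs' buf' heq ih =>
    rw [pvDropCons cs i hlt, pvDropCons cs (i+1) hcond.2, pvHA]
    simp only [hcond.1, List.headD_cons, List.tail_cons, ne_eq, reduceCtorEq, not_false_eq_true,
      and_true, if_pos, show cs.getD (i+1) ' ' = '#' from heq]
    exact ih
  | case2 segs tag buf i hlt hcond nxtv segs' buf' h1 heq ih =>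
    rw [pvDropCons cs i hlt, pvDropCons cs (i+1) hcond.2, pvHA]
    simp only [hcond.1, List.headD_cons, List.tail_cons, ne_eq, reduceCtorEq, not_false_eq_true,
      and_true, if_pos, show cs.getD (i+1) ' ' = '-' from heq]
    exact ih
  | case3 segs tag buf i hlt hcond nxtv segs' buf' h1 h2 heq ih =>
    rw [pvDropCons cs i hlt, pvDropCons cs (i+1) hcond.2, pvHA]
    simp only [hcond.1, List.headD_cons, List.tail_cons, ne_eq, reduceCtorEq, not_false_eq_true,
      and_true, if_pos, show cs.getD (i+1) ' ' = '+' from heq]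
    exact ih
  | case4 segs tag buf i hlt hcond nxtv segs' buf' h1 h2 h3 hx code ih =>
    rw [pvDropCons cs i hlt, pvDropCons cs (i+1) hcond.2, pvHA]
    have hlen : 3 ≤ (List.drop (i+1+1) cs).length := by simp [List.length_drop]; omega
    simp only [hcond.1, List.headD_cons, List.tail_cons, ne_eq, reduceCtorEq, not_false_eq_true,
      and_true, if_pos,
      if_neg (show ¬ cs.getD (i+1) ' ' = '#' from h1), if_neg (show ¬ cs.getD (i+1) ' ' = '-' from h2),
      if_neg (show ¬ cs.getD (i+1) ' ' = '+' from h3),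
      if_pos (show cs.getD (i+1) ' ' = 'x' ∧ 3 ≤ (List.drop (i+1+1) cs).length ∧
        PySem.Chars.strIsdigit (List.take 3 (List.drop (i+1+1) cs)) = true from ⟨hx.1, hlen, hx.2.2⟩)]
    rw [List.drop_drop, show i + 1 + 1 + 3 = i + 5 by omega]
    exact ih
  | case5 segs tag buf i hlt hcond nxtv segs' buf' h1 h2 h3 h4 htk ih =>
    rw [pvDropCons cs i hlt, pvDropCons cs (i+1) hcond.2, pvHA]
    have hx : ¬ (cs.getD (i+1) ' ' = 'x' ∧ 3 ≤ (List.drop (i+1+1) cs).length ∧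
        PySem.Chars.strIsdigit (List.take 3 (List.drop (i+1+1) cs)) = true) := by
      intro hc
      exact h4 ⟨hc.1, by simp [List.length_drop] at hc ⊢; omega, hc.2.2⟩
    simp only [hcond.1, List.headD_cons, List.tail_cons, ne_eq, reduceCtorEq, not_false_eq_true,
      and_true, if_pos,
      if_neg (show ¬ cs.getD (i+1) ' ' = '#' from h1), if_neg (show ¬ cs.getD (i+1) ' ' = '-' from h2),
      if_neg (show ¬ cs.getD (i+1) ' ' = '+' from h3), if_neg hx, if_pos (show TK_COLORS.contains (cs.getD (i+1) ' ') = true from htk)]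
    exact ih
  | case6 segs tag buf i hlt hcond nxtv segs' buf' h1 h2 h3 h4 h5 ih =>
    rw [pvDropCons cs i hlt, pvDropCons cs (i+1) hcond.2, pvHA]
    have hx : ¬ (cs.getD (i+1) ' ' = 'x' ∧ 3 ≤ (List.drop (i+1+1) cs).length ∧
        PySem.Chars.strIsdigit (List.take 3 (List.drop (i+1+1) cs)) = true) := by
      intro hc
      exact h4 ⟨hc.1, by simp [List.length_drop] at hc ⊢; omega, hc.2.2⟩
    simp only [hcond.1, List.headD_cons, List.tail_cons, ne_eq, reduceCtorEq, not_false_eq_true,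
      and_true, if_pos,
      if_neg (show ¬ cs.getD (i+1) ' ' = '#' from h1), if_neg (show ¬ cs.getD (i+1) ' ' = '-' from h2),
      if_neg (show ¬ cs.getD (i+1) ' ' = '+' from h3), if_neg hx,
      if_neg (show ¬ TK_COLORS.contains (cs.getD (i+1) ' ') = true from h5)]
    rw [← pvDropCons cs (i+1) hcond.2, ← hcond.1]
    exact ih
  | case7 segs tag buf i hlt hcond ih =>
    rw [pvDropCons cs i hlt, pvHA]
    have : ¬ (cs.getD i ' ' = '#' ∧ cs.drop (i+1) ≠ []) := by
      intro hc
      exact hcond ⟨hc.1, by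
        have := hc.2
        simp at this ⊢
        omega⟩
    rw [if_neg this]
    exact ih
  | case8 segs tag buf i hlt hb =>
    rw [List.drop_eq_nil_of_le (by omega), pvHA, if_pos hb]
  | case9 segs tag buf i hlt hb =>
    rw [List.drop_eq_nil_of_le (by omega), pvHA, if_neg hb]


def pvFin (st : List (String × String) × String × List Char) : List (String × String) :=
  if st.2.2 ≠ [] then st.1 ++ [(String.ofList st.2.2, st.2.1)] else st.1

theorem pvIsdigit3 (a b c : Char) :
    PySem.Chars.strIsdigit [a, b, c] =
      (PySem.Chars.isdigit a && PySem.Chars.isdigit b && PySem.Chars.isdigit c) := by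
  simp [PySem.Chars.strIsdigit]; rw [Bool.and_assoc]


theorem pvTokens_single (c : Char) (rest : List Char) (h : c ≠ '#') :
    pvTokens (c :: rest) = [c] :: pvTokens rest := by
  cases rest with
  | nil => simp [pvTokens]
  | cons b r =>
    cases b
    cases r <;> simp [pvTokens, h]

theorem pvTokens_hash (c2 : Char) (rest2 : List Char)
    (h : ¬(c2 = 'x' ∧ 3 ≤ rest2.length ∧ PySem.Chars.strIsdigit (rest2.take 3) = true)) :
    pvTokens ('#' :: c2 :: rest2) = ['#', c2] :: pvTokens rest2 := by
  by_cases hx : c2 = 'x'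
  · subst hx
    match rest2 with
    | [] => simp [pvTokens]
    | [d1] => simp [pvTokens]
    | [d1, d2] => simp [pvTokens]
    | d1 :: d2 :: d3 :: r =>
      have hd : ¬(PySem.Chars.isdigit d1 && PySem.Chars.isdigit d2 && PySem.Chars.isdigit d3) = true := by
        intro hd
        exact h ⟨rfl, by simp, by simpa [pvIsdigit3] using hd⟩
      simp [pvTokens, hd]
  · simp [pvTokens, hx]

theorem pvHA_eq_fold (l : List Char) (segs : List (String × String)) (tag : String)
    (buf : List Char) :
    pvHA l segs tag buf = pvFin ((pvTokens l).foldl pvBstep (segs, tag, buf)) := by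
  fun_induction pvHA l segs tag buf with
  | case1 segs tag buf hb => simp [pvTokens, pvFin, hb]
  | case2 segs tag buf hb => simp [pvTokens, pvFin, hb]
  | case3 c rest segs tag buf hc nxtv segs' buf'  heq ih =>
    obtain ⟨c2, rest2, rfl⟩ := List.exists_cons_of_ne_nil hc.2
    have hc2 : c2 = '#' := heq
    subst hc2
    obtain ⟨hcc, -⟩ := hc
    subst hcc
    have e1 : pvESCAPES.contains ['#', '#'] = true := by decide
    have e2 : (pvESCAPES.getD ['#', '#'] "").toList = ['#'] := by decide
    rw [ih]
    congr 1
    simp only [show segs' = (if _h : buf ≠ [] then segs ++ [(String.ofList buf, tag)] else segs) from rfl,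
      show buf' = (if _h : buf ≠ [] then ([] : List Char) else buf) from rfl]
    by_cases hb : buf = [] <;> simp [pvTokens, pvBstep, hb, e1, e2]
  | case4 c rest segs tag buf hc nxtv segs' buf' h1 heq ih =>
    obtain ⟨c2, rest2, rfl⟩ := List.exists_cons_of_ne_nil hc.2
    have hc2 : c2 = '-' := heq
    subst hc2
    obtain ⟨hcc, -⟩ := hc
    subst hcc
    have e1 : pvESCAPES.contains ['#', '-'] = true := by decide
    have e2 : (pvESCAPES.getD ['#', '-'] "").toList = ['~'] := by decide
    rw [ih]
    congr 1
    simp only [show segs' = (if _h : buf ≠ [] then segs ++ [(String.ofList buf, tag)] else segs) from rfl,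
      show buf' = (if _h : buf ≠ [] then ([] : List Char) else buf) from rfl]
    by_cases hb : buf = [] <;> simp [pvTokens, pvBstep, hb, e1, e2]
  | case5 c rest segs tag buf hc nxtv segs' buf' h1 h2 heq ih =>
    obtain ⟨c2, rest2, rfl⟩ := List.exists_cons_of_ne_nil hc.2
    have hc2 : c2 = '+' := heq
    subst hc2
    obtain ⟨hcc, -⟩ := hc
    subst hcc
    have e1 : pvESCAPES.contains ['#', '+'] = true := by decide
    have e2 : (pvESCAPES.getD ['#', '+'] "").toList = ['%'] := by decide
    rw [ih]
    congr 1
    simp only [show segs' = (if _h : buf ≠ [] then segs ++ [(String.ofList buf, tag)] else segs) from rfl,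
      show buf' = (if _h : buf ≠ [] then ([] : List Char) else buf) from rfl]
    by_cases hb : buf = [] <;> simp [pvTokens, pvBstep, hb, e1, e2]
  | case6 c rest segs tag buf hc nxtv segs' buf' h1 h2 h3 hx ih =>
    obtain ⟨c2, rest2, rfl⟩ := List.exists_cons_of_ne_nil hc.2
    have hc2 : c2 = 'x' := hx.1
    subst hc2
    obtain ⟨hcc, -⟩ := hc
    subst hcc
    match rest2, hx, ih with
    | d1 :: d2 :: d3 :: r, hx, ih =>
      have hd : (PySem.Chars.isdigit d1 && PySem.Chars.isdigit d2 && PySem.Chars.isdigit d3) = true := by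
        simpa [pvIsdigit3] using hx.2.2
      have e1 : pvESCAPES.contains ['#', 'x', d1, d2, d3] = false := by
        rw [show pvESCAPES = PySem.Dict.mk [(['#', '#'], "#"), (['#', '-'], "~"), (['#', '+'], "%")] from rfl]
        simp [PySem.Dict.contains_mk]
      rw [ih]
      congr 1
      simp only [show segs' = (if _h : buf ≠ [] then segs ++ [(String.ofList buf, tag)] else segs) from rfl,
        show buf' = (if _h : buf ≠ [] then ([] : List Char) else buf) from rfl]
      by_cases hb : buf = [] <;> simp [pvTokens, pvBstep, hd, hb, e1]
  | case7 c rest segs tag buf hc nxtv segs' buf' h1 h2 h3 h4 htk ih =>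
    obtain ⟨c2, rest2, rfl⟩ := List.exists_cons_of_ne_nil hc.2
    obtain ⟨hcc, -⟩ := hc
    subst hcc
    have h1' : ¬c2 = '#' := h1
    have h2' : ¬c2 = '-' := h2
    have h3' : ¬c2 = '+' := h3
    have e1 : pvESCAPES.contains ['#', c2] = false := by
      rw [show pvESCAPES = PySem.Dict.mk [(['#', '#'], "#"), (['#', '-'], "~"), (['#', '+'], "%")] from rfl]
      simp [PySem.Dict.contains_mk]
      exact ⟨fun h => h1' h.symm, fun h => h2' h.symm, fun h => h3' h.symm⟩
    rw [ih]
    congr 1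
    rw [pvTokens_hash c2 rest2 (by simpa using h4)]
    simp only [show segs' = (if _h : buf ≠ [] then segs ++ [(String.ofList buf, tag)] else segs) from rfl,
      show buf' = (if _h : buf ≠ [] then ([] : List Char) else buf) from rfl]
    by_cases hb : buf = [] <;> simp [pvBstep, hb, e1, show TK_COLORS.contains c2 = true from htk] <;> rfl
  | case8 c rest segs tag buf hc nxtv segs' buf' h1 h2 h3 h4 h5 ih =>
    obtain ⟨c2, rest2, rfl⟩ := List.exists_cons_of_ne_nil hc.2
    obtain ⟨hcc, -⟩ := hc
    subst hcc
    have h1' : ¬c2 = '#' := h1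
    have h2' : ¬c2 = '-' := h2
    have h3' : ¬c2 = '+' := h3
    have e1 : pvESCAPES.contains ['#', c2] = false := by
      rw [show pvESCAPES = PySem.Dict.mk [(['#', '#'], "#"), (['#', '-'], "~"), (['#', '+'], "%")] from rfl]
      simp [PySem.Dict.contains_mk]
      exact ⟨fun h => h1' h.symm, fun h => h2' h.symm, fun h => h3' h.symm⟩
    rw [ih, pvTokens_single c2 rest2 h1']
    congr 1
    rw [pvTokens_hash c2 rest2 (by simpa using h4)]
    simp only [show segs' = (if _h : buf ≠ [] then segs ++ [(String.ofList buf, tag)] else segs) from rfl,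
      show buf' = (if _h : buf ≠ [] then ([] : List Char) else buf) from rfl]
    by_cases hb : buf = [] <;>
      simp [pvBstep, hb, e1, h1', show TK_COLORS.contains c2 = false from by simpa using h5]
  | case9 c rest segs tag buf hc ih =>
    rw [ih]
    congr 1
    by_cases hch : c = '#'
    · subst hch
      have hr : rest = [] := by
        by_contra hr
        exact hc ⟨rfl, hr⟩
      subst hr
      simp [pvTokens, pvBstep]
    · rw [pvTokens_single c rest hch]
      simp [pvBstep, hch]

-- ===== VERDICT (by name: the statement is the Claim_ definition above) =====
theorem parse_colored_segments_spec : Claim_equal_parse_colored_segments := by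
  intro text _
  show _ = _
  rw [parse_colored_segments, pvA_eq_hA, List.drop_zero, pvHA_eq_fold]
  rfl
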